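-- pv_equiv track=rewrite | github.com/Bernard-LTW/Year2 | QuizCode/Quiz074.py | build_data_pkg
-- ===== SOURCE A (Python) =====
-- def build_data_pkg(mac_rx,ip_rx,mac_sx,ip_sx,data):
--     chunks = 0
--     leftover = 0
--     if len(data) % 4 == 0:
--         chunks = len(data) // 4
--     else:
--         chunks = len(data) // 4
--         leftover = len(data) % 4
--     output = []
--     for i in range(chunks):
--         target = data[i*4:(i+1)*4]
--         output.append(f"{mac_rx}|{ip_rx}|{mac_sx}|{ip_sx}|{i}|{target}")
--     if leftover:
--         target = data[-leftover:]
--         output.append(f"{mac_rx}|{ip_rx}|{mac_sx}|{ip_sx}|{chunks}|{target}")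
--     return output
-- ===== SOURCE B (Python) =====
-- def build_data_pkg(mac_rx, ip_rx, mac_sx, ip_sx, data):
--     # Recursive decomposition: peel 4-character chunks off the front.
--     # The chunks/leftover arithmetic and the separate trailing branch disappear.
--     def go(idx, rest):
--         if not rest:
--             return []
--         return [f"{mac_rx}|{ip_rx}|{mac_sx}|{ip_sx}|{idx}|{rest[:4]}"] + go(idx + 1, rest[4:])
--     return go(0, data)
-- ===== Notes on version B (the rewrite author's own statement) =====
-- stated objective: simpler
-- what changed: Replaced the chunks/leftover length arithmetic, the index-based for-loop over absolute slices and the separate trailing-chunk branch by a single recursion that peels the first 4 characters off the remaining string.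
import Mathlib
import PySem

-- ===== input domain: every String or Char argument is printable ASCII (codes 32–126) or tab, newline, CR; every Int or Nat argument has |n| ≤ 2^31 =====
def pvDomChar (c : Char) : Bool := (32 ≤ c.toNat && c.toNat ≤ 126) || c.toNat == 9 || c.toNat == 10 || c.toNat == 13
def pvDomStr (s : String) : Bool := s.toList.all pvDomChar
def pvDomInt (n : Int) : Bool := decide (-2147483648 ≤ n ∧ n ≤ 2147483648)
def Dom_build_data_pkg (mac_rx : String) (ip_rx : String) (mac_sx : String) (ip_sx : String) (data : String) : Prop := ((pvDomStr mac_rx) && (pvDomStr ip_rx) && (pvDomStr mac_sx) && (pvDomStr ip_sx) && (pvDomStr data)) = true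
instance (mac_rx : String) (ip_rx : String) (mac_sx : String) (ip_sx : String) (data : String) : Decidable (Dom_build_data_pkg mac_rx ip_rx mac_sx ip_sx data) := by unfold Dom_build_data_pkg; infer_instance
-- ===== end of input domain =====

-- B replaces A's chunks/leftover arithmetic and trailing-chunk branch by one recursion
-- peeling 4 characters off the front; objective: simpler (same O(n) cost).

-- shared helper: the f-string f"{mac_rx}|{ip_rx}|{mac_sx}|{ip_sx}|{i}|{target}"
def pvFmt (mac_rx ip_rx mac_sx ip_sx : String) (i : Int) (target : List Char) : String :=
  String.ofList (mac_rx.toList ++ '|' :: ip_rx.toList ++ '|' :: mac_sx.toList ++ '|' :: ip_sx.toList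
    ++ '|' :: PySem.Int.toChars i ++ '|' :: target)

-- ===== PORT A =====
def build_data_pkg (mac_rx : String) (ip_rx : String) (mac_sx : String) (ip_sx : String) (data : String) : List String :=
  let d := data.toList
  let n : Int := PySem.Str.len data
  let chunks : Int := PySem.Int.floordiv n 4
  let leftover : Int := if PySem.Int.mod n 4 = 0 then 0 else PySem.Int.mod n 4
  let output : List String := (PySem.List.pyRange 0 chunks 1).foldl
    (fun out i =>
      out ++ [pvFmt mac_rx ip_rx mac_sx ip_sx i (PySem.List.slice d (some (i*4)) (some ((i+1)*4)))]) []
  if leftover ≠ 0 then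
    output ++ [pvFmt mac_rx ip_rx mac_sx ip_sx chunks (PySem.List.slice d (some (-leftover)) none)]
  else output

-- ===== PORT B =====
def pvGo (mac_rx ip_rx mac_sx ip_sx : String) (idx : Int) (rest : List Char) : List String :=
  if h : rest = [] then []
  else
    [pvFmt mac_rx ip_rx mac_sx ip_sx idx (PySem.List.slice rest none (some 4))]
      ++ pvGo mac_rx ip_rx mac_sx ip_sx (idx + 1) (PySem.List.slice rest (some 4) none)
termination_by rest.length
decreasing_by
  rw [PySem.List.slice_from rest (by omega : (0:Int) ≤ 4)]
  have := List.length_pos_iff.mpr h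
  simp only [List.length_drop]
  norm_num
  omega

def build_data_pkg_alt (mac_rx : String) (ip_rx : String) (mac_sx : String) (ip_sx : String) (data : String) : List String :=
  pvGo mac_rx ip_rx mac_sx ip_sx 0 data.toList

-- ===== PRECONDITION & SPEC =====
def Spec_build_data_pkg (mac_rx : String) (ip_rx : String) (mac_sx : String) (ip_sx : String) (data : String) (out : List String) : Prop := out = build_data_pkg_alt mac_rx ip_rx mac_sx ip_sx data
instance (mac_rx : String) (ip_rx : String) (mac_sx : String) (ip_sx : String) (data : String) (out : List String) : Decidable (Spec_build_data_pkg mac_rx ip_rx mac_sx ip_sx data out) := by unfold Spec_build_data_pkg; infer_instance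

-- ===== CLAIM (what is proved, stated in full; the proofs are below) =====
def Claim_equal_build_data_pkg : Prop := ∀ (mac_rx : String) (ip_rx : String) (mac_sx : String) (ip_sx : String) (data : String), Dom_build_data_pkg mac_rx ip_rx mac_sx ip_sx data → Spec_build_data_pkg mac_rx ip_rx mac_sx ip_sx data (build_data_pkg mac_rx ip_rx mac_sx ip_sx data)

-- ===== LEMMAS AND PROOFS =====

-- B's recursion with the Python slices rewritten to take/drop
theorem pvGo_eq (mac_rx ip_rx mac_sx ip_sx : String) (idx : Int) (rest : List Char) :
    pvGo mac_rx ip_rx mac_sx ip_sx idx rest =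
      if rest = [] then []
      else pvFmt mac_rx ip_rx mac_sx ip_sx idx (rest.take 4)
        :: pvGo mac_rx ip_rx mac_sx ip_sx (idx + 1) (rest.drop 4) := by
  rw [pvGo]
  split
  · rfl
  · rw [PySem.List.slice_to rest (by omega : (0:Int) ≤ 4),
        PySem.List.slice_from rest (by omega : (0:Int) ≤ 4)]
    rfl

-- Nat-arithmetic normal form of A's output
def pvF (mac_rx ip_rx mac_sx ip_sx : String) (idx : Int) (d : List Char) : List String :=
  (List.range (d.length / 4)).map
    (fun (k : Nat) => pvFmt mac_rx ip_rx mac_sx ip_sx (idx + (k:Int)) ((d.drop (4*k)).take 4))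
  ++ (if d.length % 4 ≠ 0 then
        [pvFmt mac_rx ip_rx mac_sx ip_sx (idx + ((d.length / 4 : Nat) : Int)) (d.drop (4*(d.length/4)))]
      else [])

theorem A_eq_F (mac_rx ip_rx mac_sx ip_sx : String) (data : String) :
    build_data_pkg mac_rx ip_rx mac_sx ip_sx data = pvF mac_rx ip_rx mac_sx ip_sx 0 data.toList := by
  unfold build_data_pkg pvF
  simp only [PySem.Str.len_eq]
  set d := data.toList with hdd
  set n := d.length with hn
  have hdiv : PySem.Int.floordiv (n:Int) 4 = ((n/4 : Nat) : Int) := by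
    rw [PySem.Int.floordiv_eq_ediv_of_pos (by omega)]
    exact Eq.symm (Nat.ToInt.div_congr rfl rfl)
  have hmod : PySem.Int.mod (n:Int) 4 = ((n%4 : Nat) : Int) := by
    rw [PySem.Int.mod_eq_emod_of_pos (by omega)]
    exact Eq.symm (Nat.ToInt.mod_congr rfl rfl)
  rw [hdiv, hmod, PySem.List.foldl_append_singleton_eq_map, PySem.List.pyRange_one, List.map_map]
  simp only [sub_zero, Int.toNat_natCast, zero_add, Function.comp_def]
  have hmap : ∀ k ∈ List.range (n/4),
      pvFmt mac_rx ip_rx mac_sx ip_sx (k:Int) (PySem.List.slice d (some ((k:Int)*4)) (some (((k:Int)+1)*4)))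
        = pvFmt mac_rx ip_rx mac_sx ip_sx (k:Int) ((d.drop (4*k)).take 4) := by
    intro k hk
    have h4 : ((k:Int)*4) = ((4*k : Nat) : Int) := by push_cast; ring
    have h5 : (((k:Int))+1)*4 = ((4*k : Nat) : Int) + ((4:Nat):Int) := by push_cast; ring
    rw [h4, h5, PySem.List.slice_natCast_add]
  by_cases h : n % 4 = 0
  · rw [List.map_congr_left hmap]
    simp [h]
  · have hne : ((n % 4 : Nat) : Int) ≠ 0 := by exact_mod_cast h
    simp only [if_neg hne]
    rw [if_pos hne, List.map_congr_left hmap]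
    simp only [ne_eq, h, not_false_eq_true, if_true]
    congr 1
    rw [PySem.List.slice_from_neg_natCast d (n % 4) (Nat.pos_of_ne_zero h)]
    have h2 : d.length - n % 4 = 4 * (n / 4) := by omega
    rw [h2]

theorem F_eq_go (mac_rx ip_rx mac_sx ip_sx : String) :
    ∀ (N : Nat) (d : List Char), d.length ≤ N → ∀ idx : Int,
      pvF mac_rx ip_rx mac_sx ip_sx idx d = pvGo mac_rx ip_rx mac_sx ip_sx idx d := by
  intro N
  induction N with
  | zero =>
    intro d hd idx
    have : d = [] := List.length_eq_zero_iff.mp (Nat.le_zero.mp hd)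
    subst this
    rw [pvGo_eq, if_pos rfl]
    simp [pvF]
  | succ N ih =>
    intro d hd idx
    by_cases hnil : d = []
    · subst hnil
      rw [pvGo_eq, if_pos rfl]
      simp [pvF]
    · rw [pvGo_eq, if_neg hnil]
      by_cases hbig : 4 ≤ d.length
      · -- at least one full chunk: peel it, use the IH on d.drop 4
        have hdl : (d.drop 4).length = d.length - 4 := by simp
        have hdiv : d.length / 4 = (d.drop 4).length / 4 + 1 := by rw [hdl]; omega
        have hmod : d.length % 4 = (d.drop 4).length % 4 := by rw [hdl]; omega
        rw [← ih (d.drop 4) (by simp; omega) (idx + 1)]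
        unfold pvF
        rw [hdiv, hmod, List.range_succ_eq_map, List.map_cons, List.map_map]
        simp only [Nat.mul_zero, List.drop_zero, Nat.cast_zero, add_zero, List.cons_append]
        congr 1
        congr 1
        · apply List.map_congr_left
          intro k hk
          simp only [Function.comp_apply, Nat.succ_eq_add_one]
          have hdd : d.drop (4 * (k + 1)) = (d.drop 4).drop (4 * k) := by
            rw [List.drop_drop]; congr 1; ring
          rw [hdd]
          congr 1
          push_cast; ring
        · split
          · rw [List.drop_drop]
            congr 2
            · push_cast; ring
            · congr 1; omega
          · rfl
      · -- final short chunk: 1 ≤ d.length ≤ 3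
        have h1 : 0 < d.length := List.length_pos_iff.mpr hnil
        have hdiv : d.length / 4 = 0 := by omega
        have hmod : d.length % 4 = d.length := by omega
        have htake : d.take 4 = d := List.take_of_length_le (by omega)
        have hdrop : d.drop 4 = [] := List.drop_eq_nil_of_le (by omega)
        rw [hdrop, pvGo_eq, if_pos rfl]
        unfold pvF
        rw [hdiv, hmod]
        simp only [List.range_zero, List.map_nil, List.nil_append, Nat.cast_zero, add_zero,
          Nat.mul_zero, List.drop_zero]
        rw [if_pos (by omega), htake]

-- ===== VERDICT (by name: the statement is the Claim_ definition above) =====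
theorem build_data_pkg_spec : Claim_equal_build_data_pkg := by
  intro mac_rx ip_rx mac_sx ip_sx data _
  unfold Spec_build_data_pkg build_data_pkg_alt
  rw [A_eq_F, F_eq_go mac_rx ip_rx mac_sx ip_sx data.toList.length data.toList le_rfl]
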